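-- pv_equiv track=rewrite | github.com/dhruvbhargav08/DSA | Distinct_Difference.py | getDistinctDifference
-- ===== SOURCE A (Python) =====
-- from typing import List
--
-- def getDistinctDifference(N : int, A : List[int]) -> List[int]:
--     # code here
--     set_left=set()
--     set_right=set()
--     left=[0]*N
--     right=[0]*N
--     res=[0]*N
--     len_left=0
--     len_right=0
--     for i in range (N):
--         left[i]=len_left
--         if A[i] not in set_left:
--             len_left+=1
--             set_left.add(A[i])
--     for i in range (N-1,-1,-1):
--         right[i]=len_right
--         if A[i] not in set_right:
--             len_right+=1
--             set_right.add(A[i])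
--     for i in range (N):
--         res[i]=left[i]-right[i]
--     return res
-- ===== SOURCE B (Python) =====
-- from typing import List
--
-- def getDistinctDifference(N : int, A : List[int]) -> List[int]:
--     # One forward pass: a growing prefix set and a live decrementing
--     # count-dict for the suffix, instead of three passes with two arrays.
--     prefix = A[:N]
--     cnt = {}
--     for x in prefix:
--         cnt[x] = cnt.get(x, 0) + 1
--     left = set()
--     res = []
--     for x in prefix:
--         cnt[x] -= 1
--         if cnt[x] == 0:
--             del cnt[x]
--         res.append(len(left) - len(cnt))
--         left.add(x)
--     return res
-- ===== Notes on version B (the rewrite author's own statement) =====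
-- stated objective: alternative
-- what changed: Replaces A's three passes with two prefix/suffix distinct-count arrays by a single forward result pass that keeps a growing prefix set and a live decrementing count-dict for the suffix (deleting keys that hit zero), so no positional arrays are built.
-- outside the precondition, e.g. on getDistinctDifference(-1, [1, 2]): A returns [], B returns [0]; on getDistinctDifference(3, [1]): A raises IndexError, B returns [0]
import Mathlib
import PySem

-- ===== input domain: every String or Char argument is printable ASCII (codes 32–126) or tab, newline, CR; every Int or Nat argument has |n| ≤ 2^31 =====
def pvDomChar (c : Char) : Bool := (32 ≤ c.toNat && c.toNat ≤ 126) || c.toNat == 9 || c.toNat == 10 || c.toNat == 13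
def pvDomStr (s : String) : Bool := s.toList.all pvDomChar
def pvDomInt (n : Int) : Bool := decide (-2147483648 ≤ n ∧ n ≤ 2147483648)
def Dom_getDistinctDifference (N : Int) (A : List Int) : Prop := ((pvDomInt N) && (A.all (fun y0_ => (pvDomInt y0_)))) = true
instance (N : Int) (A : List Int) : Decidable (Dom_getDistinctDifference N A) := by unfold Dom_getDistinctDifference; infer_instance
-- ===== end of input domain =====

-- B replaces A's three passes (prefix array, suffix array, subtraction pass) by one forward
-- pass over A[:N] keeping a growing prefix set and a live decrementing count-dict for the
-- suffix; same return value on the stated domain (objective: alternative, not faster).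

-- ===== PORT A =====
-- the body shared by A's first two loops: record the running distinct count, then add A[i]
def distinctMark (A : List Int) (st : List Int × PySem.Set Int × Int) (i : Int) : List Int × PySem.Set Int × Int :=
  let a := (PySem.List.pyGet? A i).getD 0
  (st.1.set i.toNat st.2.2,
   if st.2.1.contains a then (st.2.1, st.2.2) else (st.2.1.add a, st.2.2 + 1))

def getDistinctDifference (N : Int) (A : List Int) : List Int :=
  let leftLoop :=
    (PySem.List.pyRange 0 N 1).foldl (distinctMark A)
      (List.replicate N.toNat 0, PySem.Set.empty, 0)
  let rightLoop :=
    (PySem.List.pyRange (N - 1) (-1) (-1)).foldl (distinctMark A)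
      (List.replicate N.toNat 0, PySem.Set.empty, 0)
  (PySem.List.pyRange 0 N 1).foldl
    (fun (res : List Int) i =>
      res.set i.toNat ((PySem.List.pyGet? leftLoop.1 i).getD 0 - (PySem.List.pyGet? rightLoop.1 i).getD 0))
    (List.replicate N.toNat 0)

-- ===== PORT B =====
-- one step of Source B's single result pass: decrement the suffix counter (deleting a key that
-- hits zero), append len(left) - len(cnt), then add x to the prefix set
def altStep (st : PySem.Dict Int Int × PySem.Set Int × List Int) (x : Int) : PySem.Dict Int Int × PySem.Set Int × List Int :=
  let c := st.1.insert x (st.1.getD x 0 - 1)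
  let c := if c.getD x 0 == 0 then c.erase x else c
  (c, st.2.1.add x, st.2.2 ++ [((st.2.1.length : Int) - (c.size : Int))])

def getDistinctDifference_alt (N : Int) (A : List Int) : List Int :=
  let pre := PySem.List.slice A none (some N)
  let cnt0 := pre.foldl (fun (d : PySem.Dict Int Int) x => d.insert x (d.getD x 0 + 1)) PySem.Dict.empty
  (pre.foldl altStep (cnt0, PySem.Set.empty, [])).2.2

-- ===== PRECONDITION & SPEC =====
-- Pre_ restricts to the natural domain 0 ≤ N ≤ len(A) (N is the length of the queried prefix):
-- for N > len(A) A raises IndexError, and for negative N (meaningless as a length) A's [] is an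
-- artefact of range(N) being empty while B's slice A[:N] reads N as an end-offset.
def Pre_getDistinctDifference (N : Int) (A : List Int) : Prop := 0 ≤ N ∧ N ≤ A.length
instance (N : Int) (A : List Int) : Decidable (Pre_getDistinctDifference N A) := by unfold Pre_getDistinctDifference; infer_instance

def pvWitness_getDistinctDifference : Int × List Int := (3, [2, 7, 2])

def Spec_getDistinctDifference (N : Int) (A : List Int) (out : List Int) : Prop := out = getDistinctDifference_alt N A
instance (N : Int) (A : List Int) (out : List Int) : Decidable (Spec_getDistinctDifference N A out) := by unfold Spec_getDistinctDifference; infer_instance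

-- ===== CLAIM (what is proved, stated in full; the proofs are below) =====
def Claim_equal_getDistinctDifference : Prop := ∀ (N : Int) (A : List Int), Dom_getDistinctDifference N A → Pre_getDistinctDifference N A → Spec_getDistinctDifference N A (getDistinctDifference N A)

-- ===== LEMMAS AND PROOFS =====

-- number of distinct elements of a list, as an Int
def dCount (xs : List Int) : Int := ((PySem.Set.ofList xs).length : Int)

-- two Nodup lists with the same members have the same length
lemma len_eq_of_nodup_mem_iff {s t : List Int} (hs : s.Nodup) (ht : t.Nodup)
    (h : ∀ v, v ∈ s ↔ v ∈ t) : s.length = t.length :=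
  List.Perm.length_eq ((List.perm_ext_iff_of_nodup hs ht).mpr h)

lemma dCount_cons (x : Int) (xs : List Int) :
    dCount (x :: xs) = if x ∈ xs then dCount xs else dCount xs + 1 := by
  unfold dCount
  by_cases h : x ∈ xs
  · simp only [h, if_true]
    norm_cast
    apply len_eq_of_nodup_mem_iff (PySem.Set.nodup_ofList _) (PySem.Set.nodup_ofList _)
    intro v
    simp only [PySem.Set.mem_ofList, List.mem_cons]
    constructor
    · rintro (rfl | hv) <;> [exact h; exact hv]
    · exact Or.inr
  · simp only [h, if_false]
    have : (PySem.Set.ofList (x :: xs)).length = (PySem.Set.ofList xs ++ [x]).length := by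
      apply len_eq_of_nodup_mem_iff (PySem.Set.nodup_ofList _)
      · rw [List.nodup_append]
        refine ⟨PySem.Set.nodup_ofList _, List.nodup_singleton _, ?_⟩
        intro a ha b hb
        rw [PySem.Set.mem_ofList] at ha
        rw [List.mem_singleton] at hb
        exact fun e => h ((hb ▸ e) ▸ ha)
      · intro v
        simp only [PySem.Set.mem_ofList, List.mem_cons, List.mem_append, List.mem_singleton]
        tauto
    rw [this]
    simp [List.length_append]

-- descending range(N-1, -1, -1)
lemma pyRange_desc (n : Nat) :
    PySem.List.pyRange ((n : Int) - 1) (-1) (-1) = (List.range n).reverse.map (fun (k : Nat) => (k : Int)) := by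
  rcases n with _ | m
  · simp [PySem.List.pyRange]
  · have hc : ((((m + 1 : Nat) : Int) - 1 - (-1) + -(-1) - 1) / -(-1)).toNat = m + 1 := by
      push_cast
      norm_num
    simp only [PySem.List.pyRange]
    rw [if_neg (by norm_num), if_neg (by norm_num), if_pos (by push_cast; omega), hc]
    apply List.ext_getElem
    · simp
    · intro i h1 h2
      have hi : i < m + 1 := by simpa using h1
      simp only [List.getElem_map, List.getElem_reverse, List.getElem_range,
        List.length_reverse, List.length_range]
      omega

-- Dict.erase: lookup and keys (no such lemmas ship with PySem)
lemma dictGet?_erase {κ ν : Type} [BEq κ] [LawfulBEq κ] [DecidableEq κ] (d : PySem.Dict κ ν) (k k' : κ) :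
    (d.erase k).get? k' = if k' = k then none else d.get? k' := by
  obtain ⟨l⟩ := d
  induction l with
  | nil => simp [PySem.Dict.erase, PySem.Dict.get?]
  | cons p t ih =>
    by_cases hp : p.1 = k <;> by_cases hq : p.1 = k' <;> by_cases hk : k' = k
    all_goals
      first
      | (have hk' : ¬ k = k' := fun e => hk e.symm
         simp_all [PySem.Dict.erase, PySem.Dict.get?, List.filter_cons, List.find?_cons])
      | simp_all [PySem.Dict.erase, PySem.Dict.get?, List.filter_cons, List.find?_cons]

lemma dictKeys_erase {κ ν : Type} [BEq κ] [LawfulBEq κ] (d : PySem.Dict κ ν) (k : κ) :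
    (d.erase k).keys = d.keys.filter (fun x => !(x == k)) := by
  obtain ⟨l⟩ := d
  induction l with
  | nil => simp [PySem.Dict.erase, PySem.Dict.keys]
  | cons p t ih =>
    by_cases hp : p.1 = k <;>
      simp_all [PySem.Dict.erase, PySem.Dict.keys, List.filter_cons]

lemma dictSize_eq_dCount (d : PySem.Dict Int Int) (xs : List Int)
    (hnd : d.keys.Nodup) (h : ∀ v, d.get? v = none ↔ ¬ v ∈ xs) :
    (d.size : Int) = dCount xs := by
  unfold dCount
  norm_cast
  have hk : d.size = d.keys.length := by
    simp [PySem.Dict.size, PySem.Dict.keys]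
  rw [hk]
  apply len_eq_of_nodup_mem_iff hnd (PySem.Set.nodup_ofList _)
  intro v
  rw [PySem.Set.mem_ofList]
  exact not_iff_not.mp ((PySem.Dict.get?_eq_none_iff_not_mem_keys d v).symm.trans (h v))

-- one application of distinctMark at a valid in-range index
lemma distinctMark_step (A : List Int) (arr : List Int) (s : PySem.Set Int) (l : Int)
    (k : Nat) (hk : k < A.length) :
    distinctMark A (arr, s, l) ((k : Nat) : Int)
      = (arr.set k l, if A[k] ∈ s then (s, l) else (s ++ [A[k]], l + 1)) := by
  unfold distinctMark
  have ha : (PySem.List.pyGet? A ((k : Nat) : Int)).getD 0 = A[k] := by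
    rw [PySem.List.pyGet?_natCast, List.getElem?_eq_getElem hk]
    rfl
  rw [ha]
  simp only [Int.toNat_natCast]
  by_cases h : A[k] ∈ s
  · rw [if_pos ((PySem.Set.contains_iff s _).mpr h), if_pos h]
  · rw [if_neg (fun hc => h ((PySem.Set.contains_iff s _).mp hc)), if_neg h,
        PySem.Set.add_of_not_mem h]

-- writing at position k of a k-long prefix plus zero padding
lemma set_pad (f : Nat → Int) (n k : Nat) (hk : k < n) :
    ((List.range k).map f ++ List.replicate (n - k) 0).set k (f k)
      = (List.range (k + 1)).map f ++ List.replicate (n - (k + 1)) 0 := by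
  rw [List.set_append, if_neg (by simp)]
  simp only [List.length_map, List.length_range, Nat.sub_self]
  have h3 : n - k = (n - (k + 1)) + 1 := by omega
  rw [h3, List.replicate_succ, List.set_cons_zero, List.range_succ, List.map_append]
  simp

-- A's first loop, after the first k indices
lemma leftLoop_inv (A : List Int) (n : Nat) (hn : n ≤ A.length) :
    ∀ k, k ≤ n →
    ((List.range k).map (fun (i : Nat) => (i : Int))).foldl (distinctMark A)
        (List.replicate n 0, PySem.Set.empty, 0)
      = ((List.range k).map (fun i => dCount ((A.take n).take i)) ++ List.replicate (n - k) 0,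
         PySem.Set.ofList ((A.take n).take k), dCount ((A.take n).take k)) := by
  intro k
  induction k with
  | zero => intro _; rfl
  | succ k ih =>
    intro hk1
    have hkn : k < n := hk1
    have hkA : k < A.length := lt_of_lt_of_le hk1 hn
    have hlen : (A.take n).length = n := by simp [List.length_take]; omega
    have hkL : k < (A.take n).length := by omega
    have hAk : (A.take n)[k] = A[k] := List.getElem_take
    have hL1 : (A.take n).take (k + 1) = (A.take n).take k ++ [A[k]] := by
      rw [List.take_succ, List.getElem?_eq_getElem hkL]
      simp [hAk]
    rw [List.range_succ, List.map_append, List.foldl_append, ih (by omega)]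
    simp only [List.map_cons, List.map_nil, List.foldl_cons, List.foldl_nil]
    rw [distinctMark_step A _ _ _ k hkA]
    by_cases h : A[k] ∈ PySem.Set.ofList ((A.take n).take k)
    · rw [if_pos h]
      have hset := set_pad (fun i => dCount ((A.take n).take i)) n k hkn
      have hS : PySem.Set.ofList ((A.take n).take (k + 1))
          = PySem.Set.ofList ((A.take n).take k) := by
        rw [hL1, PySem.Set.ofList_append_singleton, PySem.Set.add_of_mem h]
      simp only [Prod.mk.injEq]
      refine ⟨?_, hS.symm, ?_⟩
      · rw [← List.range_succ]; exact hset
      · unfold dCount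
        rw [hS]
    · rw [if_neg h]
      have hset := set_pad (fun i => dCount ((A.take n).take i)) n k hkn
      have hS : PySem.Set.ofList ((A.take n).take (k + 1))
          = PySem.Set.ofList ((A.take n).take k) ++ [A[k]] := by
        rw [hL1, PySem.Set.ofList_append_singleton, PySem.Set.add_of_not_mem h]
      simp only [Prod.mk.injEq]
      refine ⟨?_, hS.symm, ?_⟩
      · rw [← List.range_succ]; exact hset
      · unfold dCount
        rw [hS]
        push_cast [List.length_append, List.length_singleton]
        ring

-- A's second loop (descending), started anywhere with a set matching the already-seen suffix
lemma rightLoop_inv (A : List Int) (n : Nat) (hn : n ≤ A.length) :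
    ∀ k, k ≤ n → ∀ (arr : List Int) (s : PySem.Set Int),
    arr.length = n → s.Nodup → (∀ v, v ∈ s ↔ v ∈ (A.take n).drop k) →
    (((List.range k).reverse.map (fun (i : Nat) => (i : Int))).foldl (distinctMark A)
        (arr, s, dCount ((A.take n).drop k))).1
      = (List.range k).map (fun i => dCount ((A.take n).drop (i + 1))) ++ arr.drop k := by
  intro k
  induction k with
  | zero => intro _ arr s _ _ _; simp
  | succ k ih =>
    intro hk1 arr s harr hnd hmem
    have hkA : k < A.length := lt_of_lt_of_le hk1 hn
    have hlen : (A.take n).length = n := by simp [List.length_take]; omega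
    have hkL : k < (A.take n).length := by omega
    have hAk : (A.take n)[k] = A[k] := List.getElem_take
    have hx : (A.take n)[k] :: (A.take n).drop (k + 1) = (A.take n).drop k :=
      List.getElem_cons_drop hkL
    have hds : ∀ v : Int, (arr.set k v).drop k = v :: arr.drop (k + 1) := by
      intro v
      rw [List.drop_set, if_neg (by omega), Nat.sub_self,
          ← List.getElem_cons_drop (show k < arr.length by omega), List.set_cons_zero]
    rw [List.range_succ, List.reverse_append]
    simp only [List.reverse_singleton, List.singleton_append, List.map_cons, List.foldl_cons]
    rw [distinctMark_step A arr s _ k hkA]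
    by_cases h : A[k] ∈ s
    · rw [if_pos h]
      have hm' : A[k] ∈ (A.take n).drop (k + 1) := (hmem _).mp h
      have hdc : dCount ((A.take n).drop k) = dCount ((A.take n).drop (k + 1)) := by
        rw [← hx, dCount_cons, if_pos (by rwa [hAk])]
      have hmem2 : ∀ v, v ∈ s ↔ v ∈ (A.take n).drop k := by
        intro v
        rw [hmem v, ← hx]
        constructor
        · exact fun hv => List.mem_cons_of_mem _ hv
        · intro hv
          rcases List.mem_cons.mp hv with rfl | hv
          · rwa [hAk]
          · exact hv
      rw [show dCount ((A.take n).drop (k + 1)) = dCount ((A.take n).drop k) from hdc.symm]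
      rw [ih (by omega) _ s (by simpa using harr) hnd hmem2]
      rw [hds]
      simp [List.map_append, hdc]
    · rw [if_neg h]
      have hm' : A[k] ∉ (A.take n).drop (k + 1) := fun hc => h ((hmem _).mpr hc)
      have hdc : dCount ((A.take n).drop k) = dCount ((A.take n).drop (k + 1)) + 1 := by
        rw [← hx, dCount_cons, if_neg (by rwa [hAk])]
      have hnd' : (s ++ [A[k]]).Nodup := by
        simp [List.nodup_append, hnd]
        exact fun a ha hae => h (hae ▸ ha)
      have hmem2 : ∀ v, v ∈ s ++ [A[k]] ↔ v ∈ (A.take n).drop k := by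
        intro v
        rw [← hx]
        simp only [List.mem_append, List.mem_singleton, List.mem_cons, hmem v, hAk]
        tauto
      rw [show dCount ((A.take n).drop (k + 1)) + 1 = dCount ((A.take n).drop k) from hdc.symm]
      rw [ih (by omega) _ _ (by simpa using harr) hnd' hmem2]
      rw [hds]
      simp [List.map_append]

-- A's third loop: pointwise subtraction of two fully-built arrays
lemma resLoop_inv (f g : Nat → Int) (n : Nat) :
    ∀ k, k ≤ n →
    ((List.range k).map (fun (i : Nat) => (i : Int))).foldl
        (fun (res : List Int) i =>
          res.set i.toNat ((PySem.List.pyGet? ((List.range n).map f) i).getD 0 -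
                           (PySem.List.pyGet? ((List.range n).map g) i).getD 0))
        (List.replicate n 0)
      = (List.range k).map (fun i => f i - g i) ++ List.replicate (n - k) 0 := by
  intro k
  induction k with
  | zero => intro _; rfl
  | succ k ih =>
    intro hk1
    have hkn : k < n := hk1
    rw [List.range_succ, List.map_append, List.foldl_append, ih (by omega)]
    simp only [List.map_cons, List.map_nil, List.foldl_cons, List.foldl_nil]
    have hget : ∀ h : Nat → Int, (PySem.List.pyGet? ((List.range n).map h) ((k : Nat) : Int)).getD 0 = h k := by
      intro h
      rw [PySem.List.pyGet?_natCast, List.getElem?_map, List.getElem?_range hkn]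
      rfl
    rw [hget f, hget g]
    simp only [Int.toNat_natCast]
    rw [← List.range_succ]
    exact set_pad (fun i => f i - g i) n k hkn

-- B's single pass, after the first k elements of the prefix
lemma altLoop_inv (L : List Int) :
    ∀ k, k ≤ L.length →
    ((L.take k).foldl altStep (PySem.Dict.counter L, PySem.Set.empty, [])).2.1
        = PySem.Set.ofList (L.take k)
    ∧ ((L.take k).foldl altStep (PySem.Dict.counter L, PySem.Set.empty, [])).2.2
        = (List.range k).map (fun i => dCount (L.take i) - dCount (L.drop (i + 1)))
    ∧ ((L.take k).foldl altStep (PySem.Dict.counter L, PySem.Set.empty, [])).1.keys.Nodup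
    ∧ (∀ v, ((L.take k).foldl altStep (PySem.Dict.counter L, PySem.Set.empty, [])).1.get? v
          = if (L.drop k).count v = 0 then none else some (((L.drop k).count v : Int))) := by
  intro k
  induction k with
  | zero =>
    intro _
    simp only [List.take_zero, List.foldl_nil, List.drop_zero]
    refine ⟨rfl, rfl, PySem.Dict.nodup_keys_counter L, ?_⟩
    intro v
    by_cases hv : v ∈ L
    · have hcnt : (PySem.Dict.counter L).getD v 0 = (L.count v : Int) :=
        PySem.Dict.getD_counter L v
      have hns : (PySem.Dict.counter L).get? v ≠ none := by
        intro hcon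
        rw [PySem.Dict.get?_eq_none_iff_not_mem_keys, PySem.Dict.keys_counter] at hcon
        exact hcon ((PySem.Set.mem_ofList _ _).mpr hv)
      obtain ⟨w, hw⟩ := Option.ne_none_iff_exists'.mp hns
      rw [PySem.Dict.getD_eq_get?_getD, hw] at hcnt
      simp only [Option.getD_some] at hcnt
      rw [hw, hcnt, if_neg (by simp [List.count_eq_zero, hv])]
    · rw [if_pos (List.count_eq_zero.mpr hv), PySem.Dict.get?_eq_none_iff_not_mem_keys,
          PySem.Dict.keys_counter]
      simp [PySem.Set.mem_ofList, hv]
  | succ k ih =>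
    intro hk1
    obtain ⟨ihS, ihR, ihN, ihG⟩ := ih (by omega)
    have hkL : k < L.length := hk1
    have hx : L[k] :: L.drop (k + 1) = L.drop k := List.getElem_cons_drop hkL
    have hL1 : L.take (k + 1) = L.take k ++ [L[k]] := by
      rw [List.take_succ, List.getElem?_eq_getElem hkL]
      rfl
    rw [hL1, List.foldl_append]
    simp only [List.foldl_cons, List.foldl_nil, altStep]
    have hcx : (L.drop k).count L[k] = (L.drop (k + 1)).count L[k] + 1 := by
      rw [← hx, List.count_cons_self]
    set st := (L.take k).foldl altStep (PySem.Dict.counter L, PySem.Set.empty, []) with hst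
    have hgDx : st.1.getD L[k] 0 = (((L.drop k).count L[k] : Nat) : Int) := by
      rw [PySem.Dict.getD_eq_get?_getD, ihG L[k], if_neg (by omega)]
      rfl
    rw [hgDx]
    set c1 := st.1.insert L[k] ((((L.drop k).count L[k] : Nat) : Int) - 1) with hc1
    have hc1x : c1.getD L[k] 0 = (((L.drop k).count L[k] : Nat) : Int) - 1 := by
      rw [hc1]
      exact PySem.Dict.getD_insert_self st.1 L[k] _ 0
    have hc1g : ∀ v, c1.get? v
        = if v = L[k] then some ((((L.drop k).count L[k] : Nat) : Int) - 1) else st.1.get? v := by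
      intro v
      rw [hc1]
      exact PySem.Dict.get?_insert st.1 L[k] v _
    have hgoal2 : st.2.1.add L[k] = PySem.Set.ofList (L.take k ++ [L[k]]) := by
      rw [PySem.Set.ofList_append_singleton, ihS]
    have hlft : ((st.2.1.length : Nat) : Int) = dCount (L.take k) := by rw [ihS]; rfl
    rw [hc1x]
    by_cases h1 : (L.drop (k + 1)).count L[k] = 0
    · rw [if_pos (show ((((L.drop k).count L[k] : Nat) : Int) - 1 == 0) = true by
        simp only [beq_iff_eq]; omega)]
      have hgc : ∀ v, (c1.erase L[k]).get? v
          = if (L.drop (k + 1)).count v = 0 then none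
            else some (((L.drop (k + 1)).count v : Int)) := by
        intro v
        rw [dictGet?_erase]
        by_cases hvx : v = L[k]
        · rw [if_pos hvx, if_pos (hvx ▸ h1)]
        · rw [if_neg hvx, hc1g v, if_neg hvx, ihG v, ← hx, List.count_cons_of_ne (Ne.symm hvx)]
      have hnod : (c1.erase L[k]).keys.Nodup := by
        rw [dictKeys_erase]
        exact ((PySem.Dict.nodup_keys_insert _ _ _ ihN).filter _)
      have hsz : ((c1.erase L[k]).size : Int) = dCount (L.drop (k + 1)) := by
        apply dictSize_eq_dCount _ _ hnod
        intro v
        rw [hgc v]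
        by_cases hz : (L.drop (k + 1)).count v = 0
        · simp [hz, List.count_eq_zero.mp hz]
        · simp only [if_neg hz]
          constructor
          · intro hcon; exact absurd hcon (by simp)
          · intro hcon; exact absurd (List.count_eq_zero.mpr hcon) hz
      refine ⟨hgoal2, ?_, hnod, hgc⟩
      rw [ihR, hlft, hsz, List.range_succ, List.map_append]
      simp
    · rw [if_neg (show ¬ ((((L.drop k).count L[k] : Nat) : Int) - 1 == 0) = true by
        simp only [beq_iff_eq]; omega)]
      have hgc : ∀ v, c1.get? v
          = if (L.drop (k + 1)).count v = 0 then none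
            else some (((L.drop (k + 1)).count v : Int)) := by
        intro v
        rw [hc1g v]
        by_cases hvx : v = L[k]
        · subst hvx
          rw [if_pos rfl, if_neg h1]
          congr 1
          omega
        · rw [if_neg hvx, ihG v, ← hx, List.count_cons_of_ne (Ne.symm hvx)]
      have hnod : c1.keys.Nodup := by
        rw [hc1]
        exact PySem.Dict.nodup_keys_insert _ _ _ ihN
      have hsz : (c1.size : Int) = dCount (L.drop (k + 1)) := by
        apply dictSize_eq_dCount _ _ hnod
        intro v
        rw [hgc v]
        by_cases hz : (L.drop (k + 1)).count v = 0
        · simp [hz, List.count_eq_zero.mp hz]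
        · simp only [if_neg hz]
          constructor
          · intro hcon; exact absurd hcon (by simp)
          · intro hcon; exact absurd (List.count_eq_zero.mpr hcon) hz
      refine ⟨hgoal2, ?_, hnod, hgc⟩
      rw [ihR, hlft, hsz, List.range_succ, List.map_append]
      simp

-- the whole of port A, evaluated
lemma portA_eval (A : List Int) (n : Nat) (hn : n ≤ A.length) :
    getDistinctDifference ((n : Nat) : Int) A
      = (List.range n).map
          (fun i => dCount ((A.take n).take i) - dCount ((A.take n).drop (i + 1))) := by
  simp only [getDistinctDifference]
  rw [PySem.List.pyRange_zero_natCast, pyRange_desc n]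
  simp only [Int.toNat_natCast]
  have hlen : (A.take n).length = n := by simp [List.length_take]; omega
  have hdrop : (A.take n).drop n = [] := List.drop_eq_nil_of_le (by omega)
  have h0r : dCount ((A.take n).drop n) = 0 := by rw [hdrop]; rfl
  have hR := rightLoop_inv A n hn n le_rfl (List.replicate n 0) PySem.Set.empty
      (by simp) List.nodup_nil (by intro v; rw [hdrop]; simp [PySem.Set.empty])
  rw [h0r] at hR
  rw [leftLoop_inv A n hn n le_rfl, hR]
  simp only [Nat.sub_self, List.replicate_zero, List.append_nil, List.drop_replicate,
    List.replicate_zero]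
  rw [resLoop_inv (fun i => dCount ((A.take n).take i))
      (fun i => dCount ((A.take n).drop (i + 1))) n n le_rfl]
  simp

-- the whole of port B, evaluated
lemma portB_eval (A : List Int) (n : Nat) (hn : n ≤ A.length) :
    getDistinctDifference_alt ((n : Nat) : Int) A
      = (List.range n).map
          (fun i => dCount ((A.take n).take i) - dCount ((A.take n).drop (i + 1))) := by
  simp only [getDistinctDifference_alt]
  rw [PySem.List.slice_to A (Int.natCast_nonneg n)]
  simp only [Int.toNat_natCast]
  rw [PySem.Dict.foldl_insert_getD_add_one_eq_counter]
  have hlen : (A.take n).length = n := by simp [List.length_take]; omega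
  have h := altLoop_inv (A.take n) (A.take n).length le_rfl
  rw [List.take_length] at h
  rw [h.2.1, hlen]

-- ===== VERDICT (by name: the statement is the Claim_ definition above) =====
theorem getDistinctDifference_spec : Claim_equal_getDistinctDifference := by
  intro N A _ hPre
  unfold Spec_getDistinctDifference
  obtain ⟨h0, hNlen⟩ := hPre
  obtain ⟨n, rfl⟩ := Int.eq_ofNat_of_zero_le h0
  have hn : n ≤ A.length := by exact_mod_cast hNlen
  rw [portA_eval A n hn, portB_eval A n hn]
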